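-- pv_equiv track=rewrite | github.com/1290901435/IMFm5C | features/ensembleFeature.py | calculateSimScore
-- ===== SOURCE A (Python) =====
-- def calculateSimScore(data1,data2):
--     score = 0
--     for i in range(len(data1)):
--         if data1[i]==data2[i]:
--             score+=2
--         else:
--             score-=1
--     return score
-- ===== SOURCE B (Python) =====
-- def calculateSimScore(data1, data2):
--     def go(lo, hi):
--         if hi - lo <= 0:
--             return 0
--         if hi - lo == 1:
--             return 2 if data1[lo] == data2[lo] else -1
--         mid = (lo + hi) // 2
--         return go(lo, mid) + go(mid, hi)
--     return go(0, len(data1))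
-- ===== Notes on version B (the rewrite author's own statement) =====
-- stated objective: alternative
-- what changed: Replaces A's left-to-right index loop with +2/-1 accumulation by a divide-and-conquer recursion that splits the index interval at its midpoint, scores single positions at the leaves and adds the two half-scores.
import Mathlib
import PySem

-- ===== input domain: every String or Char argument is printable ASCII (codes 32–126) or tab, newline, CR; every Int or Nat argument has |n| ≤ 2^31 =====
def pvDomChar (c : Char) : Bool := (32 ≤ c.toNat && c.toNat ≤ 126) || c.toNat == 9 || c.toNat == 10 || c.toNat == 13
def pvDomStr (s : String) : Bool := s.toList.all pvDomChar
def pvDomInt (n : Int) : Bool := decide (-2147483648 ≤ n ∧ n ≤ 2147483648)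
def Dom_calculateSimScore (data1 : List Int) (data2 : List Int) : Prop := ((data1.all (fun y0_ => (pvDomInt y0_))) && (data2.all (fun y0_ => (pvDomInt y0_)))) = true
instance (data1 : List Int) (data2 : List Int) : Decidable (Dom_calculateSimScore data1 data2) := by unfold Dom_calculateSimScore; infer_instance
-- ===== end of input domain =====

-- B replaces A's index loop with a divide-and-conquer recursion over index intervals (objective: alternative; same O(n) cost).


-- ===== PORT A =====
-- loop 'for i in range(len(data1))' with the +2/-1 branch on data1[i]==data2[i]
def calculateSimScore (data1 : List Int) (data2 : List Int) : Int :=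
  (PySem.List.pyRange 0 data1.length 1).foldl
    (fun score i =>
      if PySem.List.pyGetD data1 i 0 = PySem.List.pyGetD data2 i 0 then score + 2 else score - 1)
    0

-- ===== PORT B =====
-- inner 'go(lo, hi)': divide and conquer on the index interval [lo, hi)
def simGo (data1 : List Int) (data2 : List Int) (lo hi : Int) : Int :=
  if hi - lo ≤ 0 then 0
  else if hi - lo = 1 then
    (if PySem.List.pyGetD data1 lo 0 = PySem.List.pyGetD data2 lo 0 then 2 else -1)
  else
    let mid := PySem.Int.floordiv (lo + hi) 2
    simGo data1 data2 lo mid + simGo data1 data2 mid hi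
termination_by (hi - lo).toNat
decreasing_by
  all_goals
    simp only [PySem.Int.floordiv_eq_ediv_of_pos (a := lo + hi) (b := 2) (by omega)] at *
    omega

def calculateSimScore_alt (data1 : List Int) (data2 : List Int) : Int :=
  simGo data1 data2 0 data1.length

-- ===== PRECONDITION & SPEC =====
-- Pre_ excludes exactly the inputs where Python A (and B) raise IndexError: data2 shorter than data1.
def Pre_calculateSimScore (data1 : List Int) (data2 : List Int) : Prop :=
  data1.length ≤ data2.length
instance (data1 : List Int) (data2 : List Int) : Decidable (Pre_calculateSimScore data1 data2) := by
  unfold Pre_calculateSimScore; infer_instance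
def pvWitness_calculateSimScore : List Int × List Int := ([1, 2, 3], [1, 0, 3])

def Spec_calculateSimScore (data1 : List Int) (data2 : List Int) (out : Int) : Prop := out = calculateSimScore_alt data1 data2
instance (data1 : List Int) (data2 : List Int) (out : Int) : Decidable (Spec_calculateSimScore data1 data2 out) := by unfold Spec_calculateSimScore; infer_instance

-- ===== CLAIM (what is proved, stated in full; the proofs are below) =====
def Claim_equal_calculateSimScore : Prop := ∀ (data1 : List Int) (data2 : List Int), Dom_calculateSimScore data1 data2 → Pre_calculateSimScore data1 data2 → Spec_calculateSimScore data1 data2 (calculateSimScore data1 data2)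

-- ===== LEMMAS AND PROOFS =====
-- per-position score
def simF (data1 : List Int) (data2 : List Int) (i : Int) : Int :=
  if PySem.List.pyGetD data1 i 0 = PySem.List.pyGetD data2 i 0 then 2 else -1

theorem foldl_eq_sum_simF (data1 data2 : List Int) (l : List Int) (s : Int) :
    l.foldl
      (fun score i =>
        if PySem.List.pyGetD data1 i 0 = PySem.List.pyGetD data2 i 0 then score + 2 else score - 1)
      s = s + (l.map (simF data1 data2)).sum := by
  induction l generalizing s with
  | nil => simp
  | cons a t ih =>
      simp only [List.foldl_cons, List.map_cons, List.sum_cons, ih, simF]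
      by_cases h : PySem.List.pyGetD data1 a 0 = PySem.List.pyGetD data2 a 0 <;> simp [h] <;> ring

theorem simGo_eq_sum (data1 data2 : List Int) (lo hi : Int) :
    simGo data1 data2 lo hi = ((PySem.List.pyRange lo hi 1).map (simF data1 data2)).sum := by
  rw [simGo]
  by_cases h0 : hi - lo ≤ 0
  · rw [if_pos h0, PySem.List.pyRange_one_eq_nil (by omega)]; simp
  rw [if_neg h0]
  by_cases h1 : hi - lo = 1
  · rw [if_pos h1, PySem.List.pyRange_one_cons (by omega), PySem.List.pyRange_one_eq_nil (by omega)]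
    simp [simF]
  · rw [if_neg h1]
    have hmid : lo ≤ PySem.Int.floordiv (lo + hi) 2 ∧ PySem.Int.floordiv (lo + hi) 2 ≤ hi := by
      rw [PySem.Int.floordiv_eq_ediv_of_pos (by omega)]; omega
    rw [PySem.List.pyRange_one_append lo (PySem.Int.floordiv (lo + hi) 2) hi hmid.1 hmid.2]
    show simGo data1 data2 lo (PySem.Int.floordiv (lo + hi) 2) +
        simGo data1 data2 (PySem.Int.floordiv (lo + hi) 2) hi = _
    rw [simGo_eq_sum data1 data2 lo (PySem.Int.floordiv (lo + hi) 2),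
        simGo_eq_sum data1 data2 (PySem.Int.floordiv (lo + hi) 2) hi]
    simp
termination_by (hi - lo).toNat
decreasing_by
  all_goals
    simp only [PySem.Int.floordiv_eq_ediv_of_pos (a := lo + hi) (b := 2) (by omega)] at *
    omega

-- ===== VERDICT (by name: the statement is the Claim_ definition above) =====
theorem calculateSimScore_spec : Claim_equal_calculateSimScore := by
  intro data1 data2 _ _
  unfold Spec_calculateSimScore calculateSimScore calculateSimScore_alt
  rw [foldl_eq_sum_simF, simGo_eq_sum]
  simp
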